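-- pv_equiv track=rewrite | github.com/lc-long/Nova-RAG | python/src/core/chunker/parent_child.py | _collapse_tables
-- ===== SOURCE A (Python) =====
-- _TABLE_SENTINEL = "\x00TBL\x00"
--
-- def _is_table_line(line: str) -> bool:
--     return line.startswith("|") and line.rstrip().endswith("|")
--
-- def _split_table_lines(lines: list[str], start: int) -> tuple[list[str], int]:
--     """Collect all consecutive markdown table lines starting at `start`."""
--     end = start
--     while end < len(lines) and _is_table_line(lines[end]):
--         end += 1
--     return lines[start:end], end
--
-- def _collapse_tables(text: str) -> str:
--     """Collapse each markdown table block into a single-line sentinel token.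
--
--     Paragraph breaks (double newlines) are preserved as a special sentinel
--     so they are not lost when the text is later joined for text splitting.
--     """
--     # Protect paragraph breaks: replace '\n\n' with a placeholder
--     text = text.replace("\n\n", "\x00P\x00")
--     lines = text.split("\n")
--     result = []
--     i = 0
--     while i < len(lines):
--         line = lines[i]
--         if line.startswith("|") and line.rstrip().endswith("|"):
--             table_lines, next_i = _split_table_lines(lines, i)
--             collapsed = (" " + _TABLE_SENTINEL + " ").join(
--                 t.strip() for t in table_lines
--             )
--             result.append(collapsed)
--             i = next_i
--         else:
--             # Restore paragraph breaks
--             result.append(line.replace("\x00P\x00", "\n\n"))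
--             i += 1
--     return "\n".join(result)
-- ===== SOURCE B (Python) =====
-- _TABLE_SENTINEL = "\x00TBL\x00"
--
-- def _is_table_line(line: str) -> bool:
--     return line.startswith("|") and line.rstrip().endswith("|")
--
-- def _collapse_tables(text: str) -> str:
--     # Pairwise formulation: no run collection at all. Each line is transformed
--     # locally (table lines stripped, others get their paragraph placeholder
--     # restored), and the separator between two ADJACENT lines is the table
--     # sentinel iff both are table lines, else a newline.
--     lines = text.replace("\n\n", "\x00P\x00").split("\n")
--     flags = [_is_table_line(l) for l in lines]
--
--     def xf(l, f):
--         return l.strip() if f else l.replace("\x00P\x00", "\n\n")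
--
--     pieces = [xf(lines[0], flags[0])]
--     for i in range(1, len(lines)):
--         pieces.append(" " + _TABLE_SENTINEL + " " if flags[i - 1] and flags[i] else "\n")
--         pieces.append(xf(lines[i], flags[i]))
--     return "".join(pieces)
-- ===== Notes on version B (the rewrite author's own statement) =====
-- stated objective: alternative
-- what changed: B never collects table runs: after the same placeholder/split preprocessing it transforms every line locally and decides each ADJACENT-pair separator independently (table sentinel iff both neighbours are table lines, newline otherwise), concatenating the alternating piece list, instead of A's while loop that scans ahead to collect each maximal table block and joins block strings with newlines.
import Mathlib
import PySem

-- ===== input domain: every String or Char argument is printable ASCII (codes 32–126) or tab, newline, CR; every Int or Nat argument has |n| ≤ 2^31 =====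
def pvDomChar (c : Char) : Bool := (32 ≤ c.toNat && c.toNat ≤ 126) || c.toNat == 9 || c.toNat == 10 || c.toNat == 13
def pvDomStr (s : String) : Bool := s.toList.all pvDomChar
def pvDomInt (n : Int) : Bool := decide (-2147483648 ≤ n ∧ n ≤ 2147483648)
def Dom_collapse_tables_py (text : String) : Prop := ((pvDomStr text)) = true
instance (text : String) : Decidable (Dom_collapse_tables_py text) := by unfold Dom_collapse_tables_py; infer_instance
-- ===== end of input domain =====

-- B replaces A's run-collecting while loop by a pairwise formulation: every line is
-- transformed locally and each adjacent-pair separator is decided independently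
-- (sentinel iff both neighbours are table lines); same cost (objective: alternative).

-- ===== PORT A =====

-- _is_table_line (also A's inlined copy of the same test in the main loop)
def pvIsTable (l : List Char) : Bool :=
  PySem.Chars.startswith l ['|'] && PySem.Chars.endswith (PySem.Chars.rstrip l) ['|']

-- " " + _TABLE_SENTINEL + " "
def pvSep : List Char := [' ', '\x00', 'T', 'B', 'L', '\x00', ' ']
-- "\x00P\x00"
def pvP : List Char := ['\x00', 'P', '\x00']

-- _split_table_lines: the inner while over indices, as structural recursion on the suffix;
-- returns (the consecutive table lines, the remaining suffix = lines[end:]).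
def pvSplitTable : List (List Char) → List (List Char) × List (List Char)
  | [] => ([], [])
  | l :: rest =>
    if pvIsTable l then
      let p := pvSplitTable rest
      (l :: p.1, p.2)
    else
      ([], l :: rest)

-- termination helper for A's main loop (the port cites it in decreasing_by)
theorem pvSplitTable_len (ls : List (List Char)) : (pvSplitTable ls).2.length ≤ ls.length := by
  induction ls with
  | nil => simp [pvSplitTable]
  | cons l rest ih =>
    by_cases h : pvIsTable l = true
    · simp [pvSplitTable, h]; omega
    · simp [pvSplitTable, h]

-- A's main while loop over i
def pvLoopA (ls : List (List Char)) : List (List Char) :=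
  match ls with
  | [] => []
  | l :: rest =>
    if h : pvIsTable l then
      let p := pvSplitTable (l :: rest)
      PySem.Chars.join pvSep (p.1.map PySem.Chars.strip) :: pvLoopA p.2
    else
      PySem.Chars.replace l pvP ['\n', '\n'] :: pvLoopA rest
termination_by ls.length
decreasing_by
  · simp only [pvSplitTable, h, if_pos]
    have := pvSplitTable_len rest
    simp; omega
  · simp

def collapse_tables_py (text : String) : String :=
  let cs := PySem.Chars.replace text.toList ['\n', '\n'] pvP
  let lines := PySem.Chars.splitOn cs ['\n']
  String.ofList (PySem.Chars.join ['\n'] (pvLoopA lines))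

-- ===== PORT B =====

-- xf(l, f): strip table lines, restore the paragraph placeholder on the others
def pvXf (f : Bool) (l : List Char) : List Char :=
  if f then PySem.Chars.strip l else PySem.Chars.replace l pvP ['\n', '\n']

-- the separator between two adjacent lines, from their two flags alone
def pvSepOf (a b : Bool) : List Char := if a && b then pvSep else ['\n']

-- the loop over i = 1..len(lines): emit separator(prev, cur) then xf(cur), concatenated
def pvPairs (prev : Bool) : List (List Char) → List Char
  | [] => []
  | l :: rest => pvSepOf prev (pvIsTable l) ++ pvXf (pvIsTable l) l ++ pvPairs (pvIsTable l) rest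

def collapse_tables_py_alt (text : String) : String :=
  let lines := PySem.Chars.splitOn (PySem.Chars.replace text.toList ['\n', '\n'] pvP) ['\n']
  match lines with
  | [] => ""   -- unreachable: str.split never returns an empty list
  | l :: rest => String.ofList (pvXf (pvIsTable l) l ++ pvPairs (pvIsTable l) rest)

-- ===== PRECONDITION & SPEC =====
def Spec_collapse_tables_py (text : String) (out : String) : Prop := out = collapse_tables_py_alt text
instance (text : String) (out : String) : Decidable (Spec_collapse_tables_py text out) := by unfold Spec_collapse_tables_py; infer_instance

-- ===== CLAIM =====
def Claim_equal_collapse_tables_py : Prop := ∀ (text : String), Dom_collapse_tables_py text → Spec_collapse_tables_py text (collapse_tables_py text)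

-- ===== LEMMAS AND PROOFS =====

-- pvSplitTable is a span: input = taken run ++ remainder
theorem pvSplitTable_append (ls : List (List Char)) :
    (pvSplitTable ls).1 ++ (pvSplitTable ls).2 = ls := by
  induction ls with
  | nil => simp [pvSplitTable]
  | cons l rest ih =>
    by_cases h : pvIsTable l = true
    · simp [pvSplitTable, h, ih]
    · simp [pvSplitTable, h]

theorem pvSplitTable_all (ls : List (List Char)) :
    ∀ x ∈ (pvSplitTable ls).1, pvIsTable x = true := by
  induction ls with
  | nil => simp [pvSplitTable]
  | cons l rest ih =>
    by_cases h : pvIsTable l = true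
    · simp [pvSplitTable, h]; exact ih
    · simp [pvSplitTable, h]

theorem pvSplitTable_rest (ls : List (List Char)) :
    ∀ x ∈ ((pvSplitTable ls).2).head?, pvIsTable x = false := by
  induction ls with
  | nil => simp [pvSplitTable]
  | cons l rest ih =>
    by_cases h : pvIsTable l = true
    · simpa [pvSplitTable, h] using ih
    · simp [pvSplitTable, h]

-- pvPairs over an all-table prefix: each element contributes pvSep ++ its strip
theorem pvPairs_table_prefix (t r : List (List Char))
    (hall : ∀ x ∈ t, pvIsTable x = true) :
    pvPairs true (t ++ r) = t.flatMap (fun x => pvSep ++ PySem.Chars.strip x) ++ pvPairs true r := by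
  induction t with
  | nil => simp
  | cons x t' ih =>
    have hx : pvIsTable x = true := hall x (by simp)
    simp [pvPairs, hx, pvSepOf, pvXf,
      ih (fun y hy => hall y (List.mem_cons_of_mem _ hy))]

-- join of a nonempty list of stripped lines by pvSep, as head ++ flatMap
theorem pvJoin_strip (l : List Char) (s : List (List Char)) :
    PySem.Chars.join pvSep ((l :: s).map PySem.Chars.strip) =
      PySem.Chars.strip l ++ s.flatMap (fun x => pvSep ++ PySem.Chars.strip x) := by
  induction s generalizing l with
  | nil => simp [PySem.Chars.join_singleton]
  | cons m s' ih =>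
    simp only [List.map_cons] at *
    rw [PySem.Chars.join_cons_cons, ih m]
    simp

-- MAIN: A's collected result, joined by '\n', equals B's pairwise concatenation
theorem pvMain (ls : List (List Char)) :
    PySem.Chars.join ['\n'] (pvLoopA ls) =
      (match ls with
       | [] => []
       | l :: rest => pvXf (pvIsTable l) l ++ pvPairs (pvIsTable l) rest) := by
  induction ls using pvLoopA.induct with
  | case1 => simp [pvLoopA, PySem.Chars.join_nil]
  | case2 l rest h p ih =>
    rw [pvLoopA, dif_pos h]
    have hsplit : pvSplitTable (l :: rest) = (l :: (pvSplitTable rest).1, (pvSplitTable rest).2) := by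
      simp [pvSplitTable, h]
    have happ : (pvSplitTable rest).1 ++ (pvSplitTable rest).2 = rest := by
      have := pvSplitTable_append (l :: rest)
      rw [hsplit] at this; simpa using this
    have hall : ∀ x ∈ (pvSplitTable rest).1, pvIsTable x = true := by
      intro x hx
      exact pvSplitTable_all (l :: rest) x (by rw [hsplit]; exact List.mem_cons_of_mem _ hx)
    simp only [hsplit, pvXf, h, if_true] at ih ⊢
    conv_rhs => rw [← happ]
    rw [pvPairs_table_prefix _ _ hall, pvJoin_strip]
    cases hs2 : (pvSplitTable rest).2 with
    | nil => simp [pvLoopA, pvPairs, PySem.Chars.join_singleton]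
    | cons m r2 =>
      have hm : pvIsTable m = false := by
        have := pvSplitTable_rest (l :: rest)
        rw [hsplit] at this; simp [hs2] at this; exact this
      have hp2 : p.2 = m :: r2 := by
        rw [show p = pvSplitTable (l :: rest) from rfl, hsplit]; exact hs2
      rw [hp2] at ih
      have hnil : pvLoopA (m :: r2) ≠ [] := by
        rw [pvLoopA]; split <;> simp
      cases hup : pvLoopA (m :: r2) with
      | nil => exact absurd hup hnil
      | cons a as =>
        rw [PySem.Chars.join_cons_cons, ← hup, ih]
        simp [pvPairs, pvSepOf, pvXf, hm]
  | case3 l rest h ih =>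
    rw [pvLoopA, dif_neg h]
    have hl : pvIsTable l = false := by simpa using h
    simp only [pvXf, hl, if_false, Bool.false_eq_true] at ih ⊢
    cases rest with
    | nil => simp [pvLoopA, pvPairs, PySem.Chars.join_singleton]
    | cons m r2 =>
      have hnil : pvLoopA (m :: r2) ≠ [] := by
        rw [pvLoopA]; split <;> simp
      cases hup : pvLoopA (m :: r2) with
      | nil => exact absurd hup hnil
      | cons a as =>
        rw [PySem.Chars.join_cons_cons, ← hup, ih]
        simp [pvPairs, pvSepOf, pvXf]

-- ===== VERDICT =====
theorem collapse_tables_py_spec : Claim_equal_collapse_tables_py := by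
  intro text _
  unfold Spec_collapse_tables_py collapse_tables_py collapse_tables_py_alt
  simp only [pvMain]
  cases PySem.Chars.splitOn (PySem.Chars.replace text.toList ['\n', '\n'] pvP) ['\n'] <;> rfl
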